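-- pv_equiv track=rewrite | github.com/miskamvedebel/miskamvedebel | HSE/edist.py | edistance_substring
-- ===== SOURCE A (Python) =====
-- def edistance_substring(A, B):
--     m = len(A)
--     n = len(B)
--
--     tbl = [[0 for _ in range(m+1)] for _ in range(n+1)]
--
--     # for i in range(1, m+1):
--     #     tbl[0][i] = i
--     for j in range(1, n+1):
--         tbl[j][0] = j
--
--     for i in range(1, m+1):
--         for j in range(1, n+1):
--             if A[i-1] == B[j-1]:
--                 tbl[j][i] = tbl[j-1][i-1]
--             else:
--                 tbl[j][i] = min(tbl[j-1][i], tbl[j][i-1], tbl[j-1][i-1]) + 1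
--
--     return tbl[-1][-1]
-- ===== SOURCE B (Python) =====
-- def edistance_substring(A, B):
--     memo = {}
--
--     def d(i, j):
--         # d(i, j) = edit distance between some suffix of A[:i] and B[:j]
--         if j == 0:
--             return 0
--         if i == 0:
--             return j
--         key = (i, j)
--         if key in memo:
--             return memo[key]
--         if A[i - 1] == B[j - 1]:
--             v = d(i - 1, j - 1)
--         else:
--             v = 1 + min(d(i, j - 1), d(i - 1, j), d(i - 1, j - 1))
--         memo[key] = v
--         return v
--
--     return d(len(A), len(B))
-- ===== Notes on version B (the rewrite author's own statement) =====
-- stated objective: alternative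
-- what changed: Replaces A's bottom-up (n+1)x(m+1) table fill with a top-down recursion d(i, j) over prefix lengths memoized in a dict keyed by (i, j), so values are computed on demand by recursive descent instead of filled in by nested index loops.
import Mathlib
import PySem

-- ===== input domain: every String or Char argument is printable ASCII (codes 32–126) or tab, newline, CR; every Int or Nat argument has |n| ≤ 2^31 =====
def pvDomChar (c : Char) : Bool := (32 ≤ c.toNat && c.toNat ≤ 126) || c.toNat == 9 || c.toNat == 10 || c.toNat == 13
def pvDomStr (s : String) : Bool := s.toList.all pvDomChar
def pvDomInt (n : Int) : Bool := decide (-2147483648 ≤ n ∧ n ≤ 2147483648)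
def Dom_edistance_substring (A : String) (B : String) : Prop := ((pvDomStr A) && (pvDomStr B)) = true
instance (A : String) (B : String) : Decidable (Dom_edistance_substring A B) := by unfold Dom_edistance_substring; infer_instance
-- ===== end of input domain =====

-- B replaces A's bottom-up table fill with a top-down recursion over prefix lengths memoized in a dict (alternative decomposition, same cost).

-- ===== PORT A =====
-- tbl[j][i] read/write on the nested list (indices always in range in A, so getD is exact)
def getTbl (t : List (List Int)) (j i : Nat) : Int := (t.getD j []).getD i 0
def setTbl (t : List (List Int)) (j i : Nat) (v : Int) : List (List Int) :=
  t.set j ((t.getD j []).set i v)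

def edistance_substring (A : String) (B : String) : Int :=
  let As := A.toList
  let Bs := B.toList
  let m := As.length
  let n := Bs.length
  -- tbl = [[0 for _ in range(m+1)] for _ in range(n+1)]
  let tbl0 : List (List Int) := List.replicate (n+1) (List.replicate (m+1) 0)
  -- for j in range(1, n+1): tbl[j][0] = j
  let tbl1 := (List.range n).foldl (fun t j' => setTbl t (j'+1) 0 ((j' : Int)+1)) tbl0
  -- nested i/j loops (j = j'+1, i = i'+1)
  let tbl2 := (List.range m).foldl (fun t i' =>
      (List.range n).foldl (fun t j' =>
        if As.getD i' ' ' == Bs.getD j' ' ' then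
          setTbl t (j'+1) (i'+1) (getTbl t j' i')
        else
          setTbl t (j'+1) (i'+1)
            (min (min (getTbl t j' (i'+1)) (getTbl t (j'+1) i')) (getTbl t j' i') + 1)) t) tbl1
  -- tbl[-1][-1] = last row's last cell = tbl[n][m]
  getTbl tbl2 n m

-- ===== PORT B =====
-- top-down memoized d(i, j): value plus the updated memo dict, threaded exactly as Source B does
def dMemo (As Bs : List Char) (i j : Nat) (memo : PySem.Dict (Nat × Nat) Int) :
    Int × PySem.Dict (Nat × Nat) Int :=
  match j, i with
  | 0, _ => (0, memo)                       -- if j == 0: return 0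
  | j+1, 0 => ((j : Int) + 1, memo)         -- if i == 0: return j
  | j+1, i+1 =>
    match memo.get? (i+1, j+1) with         -- if key in memo: return memo[key]
    | some v => (v, memo)
    | none =>
      if As.getD i ' ' == Bs.getD j ' ' then
        let r := dMemo As Bs i j memo
        (r.1, r.2.insert (i+1, j+1) r.1)
      else
        let r1 := dMemo As Bs (i+1) j memo
        let r2 := dMemo As Bs i (j+1) r1.2
        let r3 := dMemo As Bs i j r2.2
        let v := 1 + min (min r1.1 r2.1) r3.1
        (v, r3.2.insert (i+1, j+1) v)
termination_by i + j

def edistance_substring_alt (A : String) (B : String) : Int :=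
  (dMemo A.toList B.toList A.toList.length B.toList.length PySem.Dict.empty).1

-- ===== PRECONDITION & SPEC =====
def Spec_edistance_substring (A : String) (B : String) (out : Int) : Prop := out = edistance_substring_alt A B
instance (A : String) (B : String) (out : Int) : Decidable (Spec_edistance_substring A B out) := by unfold Spec_edistance_substring; infer_instance

-- ===== CLAIM (what is proved, stated in full; the proofs are below) =====
def Claim_equal_edistance_substring : Prop := ∀ (A : String) (B : String), Dom_edistance_substring A B → Spec_edistance_substring A B (edistance_substring A B)

-- ===== LEMMAS AND PROOFS =====

-- the pure mathematical DP value d(i, j)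
def Dfun (As Bs : List Char) (i j : Nat) : Int :=
  match j, i with
  | 0, _ => 0
  | j+1, 0 => (j : Int) + 1
  | j+1, i+1 =>
    if As.getD i ' ' == Bs.getD j ' ' then Dfun As Bs i j
    else 1 + min (min (Dfun As Bs (i+1) j) (Dfun As Bs i (j+1))) (Dfun As Bs i j)
termination_by i + j

-- mathematical rows of the DP: rowF As Bs i j = value of cell (column i of A, row j of B)
def nextRowF (Bs : List Char) (a : Char) (prev : Nat → Int) : Nat → Int
  | 0 => 0
  | j+1 => if a == Bs.getD j ' ' then prev j
           else min (min (nextRowF Bs a prev j) (prev (j+1))) (prev j) + 1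

def rowF (As Bs : List Char) : Nat → Nat → Int
  | 0 => fun j => (j : Int)
  | i+1 => nextRowF Bs (As.getD i ' ') (rowF As Bs i)

-- named copies of A's loop bodies (definitionally equal to the lambdas in the port)
def col0F (t : List (List Int)) (j' : Nat) : List (List Int) := setTbl t (j'+1) 0 ((j' : Int)+1)

def cellF (As Bs : List Char) (i' : Nat) (t : List (List Int)) (j' : Nat) : List (List Int) :=
  if As.getD i' ' ' == Bs.getD j' ' ' then
    setTbl t (j'+1) (i'+1) (getTbl t j' i')
  else
    setTbl t (j'+1) (i'+1)
      (min (min (getTbl t j' (i'+1)) (getTbl t (j'+1) i')) (getTbl t j' i') + 1)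

def colF (As Bs : List Char) (t : List (List Int)) (i' : Nat) : List (List Int) :=
  (List.range Bs.length).foldl (cellF As Bs i') t

def tblA (As Bs : List Char) (k : Nat) : List (List Int) :=
  (List.range k).foldl (colF As Bs)
    ((List.range Bs.length).foldl col0F
      (List.replicate (Bs.length+1) (List.replicate (As.length+1) 0)))

theorem foldl_range_succ {α : Type} (f : α → Nat → α) (x : α) (k : Nat) :
    (List.range (k+1)).foldl f x = f ((List.range k).foldl f x) k := by
  simp [List.range_succ]

theorem getD_set {α : Type} (l : List α) (i j : Nat) (v d : α) :
    (l.set i v).getD j d = if i = j ∧ i < l.length then v else l.getD j d := by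
  simp only [List.getD, List.getElem?_set]
  by_cases h1 : i = j
  · subst h1
    rw [if_pos rfl]
    by_cases h2 : i < l.length
    · rw [if_pos h2, if_pos ⟨rfl, h2⟩]
      rfl
    · rw [if_neg h2, if_neg (fun h => h2 h.2), List.getElem?_eq_none (by omega)]
  · rw [if_neg h1, if_neg (fun h => h1 h.1)]

theorem getTbl_setTbl (t : List (List Int)) (j i j2 i2 : Nat) (v : Int) :
    getTbl (setTbl t j i v) j2 i2 =
      if j = j2 ∧ j < t.length ∧ i = i2 ∧ i < (t.getD j []).length then v
      else getTbl t j2 i2 := by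
  show ((t.set j ((t.getD j []).set i v)).getD j2 []).getD i2 0 = _
  rw [getD_set]
  split_ifs with h1 h2 h2
  · rw [getD_set, if_pos ⟨h2.2.2.1, h2.2.2.2⟩]
  · rw [getD_set, if_neg (fun hi => h2 ⟨h1.1, h1.2, hi.1, hi.2⟩)]
    show (t.getD j []).getD i2 0 = getTbl t j2 i2
    rw [h1.1]
    rfl
  · exact absurd ⟨h2.1, h2.2.1⟩ h1
  · rfl

def Shape (t : List (List Int)) (m n : Nat) : Prop :=
  t.length = n+1 ∧ ∀ jj, (t.getD jj []).length = if jj < n+1 then m+1 else 0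

theorem shape_set {t : List (List Int)} {m n : Nat} (j i : Nat) (v : Int)
    (h : Shape t m n) : Shape (setTbl t j i v) m n := by
  obtain ⟨h1, h2⟩ := h
  refine ⟨by simp [setTbl, h1], fun jj => ?_⟩
  show ((t.set j ((t.getD j []).set i v)).getD jj []).length = _
  rw [getD_set]
  by_cases hc : j = jj ∧ j < t.length
  · rw [if_pos hc, List.length_set, hc.1]
    exact h2 jj
  · rw [if_neg hc]
    exact h2 jj

theorem shape_tbl0 (m n : Nat) :
    Shape (List.replicate (n+1) (List.replicate (m+1) (0:Int))) m n := by
  refine ⟨by simp, fun jj => ?_⟩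
  by_cases h : jj < n + 1
  · rw [if_pos h, List.getD, List.getElem?_replicate, if_pos h]
    simp
  · rw [if_neg h, List.getD, List.getElem?_replicate, if_neg h]
    rfl

theorem getTbl_tbl0 (m n j i : Nat) :
    getTbl (List.replicate (n+1) (List.replicate (m+1) (0:Int))) j i = 0 := by
  simp only [getTbl, List.getD, List.getElem?_replicate]
  split_ifs <;> simp

-- first loop: sets column 0
theorem tbl1_spec (m n : Nat) : ∀ k ≤ n,
    Shape ((List.range k).foldl col0F (List.replicate (n+1) (List.replicate (m+1) (0:Int)))) m n ∧
    ∀ j i, getTbl ((List.range k).foldl col0F (List.replicate (n+1) (List.replicate (m+1) (0:Int)))) j i =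
      if j ≤ n ∧ i ≤ m ∧ i = 0 ∧ j ≤ k then (j : Int) else 0 := by
  intro k
  induction k with
  | zero =>
    intro _
    simp only [List.range_zero, List.foldl_nil]
    refine ⟨shape_tbl0 m n, fun j i => ?_⟩
    rw [getTbl_tbl0]
    split_ifs with h
    · omega
    · rfl
  | succ k ih =>
    intro hk
    obtain ⟨hs, hv⟩ := ih (by omega)
    rw [foldl_range_succ]
    set t1 := (List.range k).foldl col0F (List.replicate (n+1) (List.replicate (m+1) (0:Int))) with ht1
    refine ⟨shape_set _ _ _ hs, fun j i => ?_⟩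
    show getTbl (setTbl t1 (k+1) 0 ((k : Int)+1)) j i = _
    rw [getTbl_setTbl, hs.1, hs.2, hv j i]
    split_ifs <;> push_cast <;> omega

-- inner loop at outer index k: fills column k+1 row by row
theorem inner_spec (As Bs : List Char) (k : Nat) (hk : k < As.length) :
    ∀ d ≤ Bs.length, ∀ t, Shape t As.length Bs.length →
    (∀ j i, getTbl t j i =
      if j ≤ Bs.length ∧ i ≤ As.length ∧ (i ≤ k ∨ (i = k+1 ∧ j ≤ 0)) then rowF As Bs i j else 0) →
    Shape ((List.range d).foldl (cellF As Bs k) t) As.length Bs.length ∧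
    ∀ j i, getTbl ((List.range d).foldl (cellF As Bs k) t) j i =
      if j ≤ Bs.length ∧ i ≤ As.length ∧ (i ≤ k ∨ (i = k+1 ∧ j ≤ d)) then rowF As Bs i j else 0 := by
  intro d
  induction d with
  | zero =>
    intro _ t hs hv
    simp only [List.range_zero, List.foldl_nil]
    exact ⟨hs, hv⟩
  | succ d ih =>
    intro hd t hs hv
    obtain ⟨hs', hv'⟩ := ih (by omega) t hs hv
    rw [foldl_range_succ]
    set t1 := (List.range d).foldl (cellF As Bs k) t with ht1
    have hrk : getTbl t1 d k = rowF As Bs k d := by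
      rw [hv' d k, if_pos ⟨by omega, by omega, Or.inl (le_refl k)⟩]
    have hrk1 : getTbl t1 (d+1) k = rowF As Bs k (d+1) := by
      rw [hv' (d+1) k, if_pos ⟨by omega, by omega, Or.inl (le_refl k)⟩]
    have hnew : getTbl t1 d (k+1) = rowF As Bs (k+1) d := by
      rw [hv' d (k+1), if_pos ⟨by omega, by omega, Or.inr ⟨rfl, by omega⟩⟩]
    have hval : (if As.getD k ' ' == Bs.getD d ' ' then getTbl t1 d k
        else min (min (getTbl t1 d (k+1)) (getTbl t1 (d+1) k)) (getTbl t1 d k) + 1)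
        = rowF As Bs (k+1) (d+1) := by
      rw [hrk, hrk1, hnew]
      show _ = nextRowF Bs (As.getD k ' ') (rowF As Bs k) (d+1)
      rw [nextRowF,
        show nextRowF Bs (As.getD k ' ') (rowF As Bs k) d = rowF As Bs (k+1) d from rfl]
    have hcell : cellF As Bs k t1 d = setTbl t1 (d+1) (k+1) (rowF As Bs (k+1) (d+1)) := by
      rw [cellF]
      split_ifs with hc
      · rw [← hval, if_pos hc]
      · rw [← hval, if_neg hc]
    rw [hcell]
    have hTlen : t1.length = Bs.length + 1 := hs'.1
    have hRlen : (t1.getD (d+1) []).length = As.length + 1 := by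
      rw [hs'.2, if_pos (by omega)]
    refine ⟨shape_set _ _ _ hs', fun j i => ?_⟩
    rw [getTbl_setTbl, hTlen, hRlen, hv' j i]
    by_cases hc1 : d+1 = j ∧ d+1 < Bs.length+1 ∧ k+1 = i ∧ k+1 < As.length+1
    · rw [if_pos hc1,
        if_pos (show j ≤ Bs.length ∧ i ≤ As.length ∧ (i ≤ k ∨ (i = k+1 ∧ j ≤ d+1)) from
          ⟨by omega, by omega, Or.inr ⟨hc1.2.2.1.symm, by omega⟩⟩),
        ← hc1.1, ← hc1.2.2.1]
    · rw [if_neg hc1]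
      by_cases hc0 : j ≤ Bs.length ∧ i ≤ As.length ∧ (i ≤ k ∨ (i = k+1 ∧ j ≤ d))
      · refine (if_pos hc0).trans (if_pos ⟨hc0.1, hc0.2.1, ?_⟩).symm
        rcases hc0.2.2 with h | h
        · exact Or.inl h
        · exact Or.inr ⟨h.1, by omega⟩
      · refine (if_neg hc0).trans (if_neg ?_).symm
        intro hc2
        apply hc0
        refine ⟨hc2.1, hc2.2.1, ?_⟩
        rcases hc2.2.2 with h | h
        · exact Or.inl h
        · by_cases hj : j ≤ d
          · exact Or.inr ⟨h.1, hj⟩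
          · exact absurd ⟨by omega, by omega, h.1.symm, by omega⟩ hc1

-- outer loop: after k outer iterations columns 0..k hold rowF, the rest is still 0
theorem outer_spec (As Bs : List Char) : ∀ k ≤ As.length,
    Shape (tblA As Bs k) As.length Bs.length ∧
    ∀ j i, getTbl (tblA As Bs k) j i =
      if j ≤ Bs.length ∧ i ≤ As.length ∧ i ≤ k then rowF As Bs i j else 0 := by
  intro k
  induction k with
  | zero =>
    intro _
    obtain ⟨hs, hv⟩ := tbl1_spec As.length Bs.length Bs.length (le_refl _)
    rw [tblA]
    simp only [List.range_zero, List.foldl_nil]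
    refine ⟨hs, fun j i => ?_⟩
    rw [hv j i]
    by_cases h1 : j ≤ Bs.length ∧ i ≤ As.length ∧ i = 0 ∧ j ≤ Bs.length
    · rw [if_pos h1, if_pos (show j ≤ Bs.length ∧ i ≤ As.length ∧ i ≤ 0 from ⟨h1.1, h1.2.1, by omega⟩)]
      have hi : i = 0 := h1.2.2.1
      subst hi
      rfl
    · rw [if_neg h1, if_neg (fun h2 => h1 ⟨h2.1, h2.2.1, by omega, h2.1⟩)]
  | succ k ih =>
    intro hk
    obtain ⟨hs, hv⟩ := ih (by omega)
    rw [tblA, foldl_range_succ, ← tblA]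
    have hv0 : ∀ j i, getTbl (tblA As Bs k) j i =
        if j ≤ Bs.length ∧ i ≤ As.length ∧ (i ≤ k ∨ (i = k+1 ∧ j ≤ 0)) then rowF As Bs i j else 0 := by
      intro j i
      rw [hv j i]
      by_cases h1 : j ≤ Bs.length ∧ i ≤ As.length ∧ i ≤ k
      · rw [if_pos h1, if_pos ⟨h1.1, h1.2.1, Or.inl h1.2.2⟩]
      · rw [if_neg h1]
        by_cases h2 : j ≤ Bs.length ∧ i ≤ As.length ∧ (i ≤ k ∨ (i = k+1 ∧ j ≤ 0))
        · rw [if_pos h2]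
          rcases h2.2.2 with h | h
          · exact absurd ⟨h2.1, h2.2.1, h⟩ h1
          · have hj : j = 0 := by omega
            have hi : i = k+1 := h.1
            subst hj hi
            rfl
        · rw [if_neg h2]
    obtain ⟨hs', hv'⟩ := inner_spec As Bs k (by omega) Bs.length (le_refl _) (tblA As Bs k) hs hv0
    rw [colF]
    refine ⟨hs', fun j i => ?_⟩
    rw [hv' j i]
    have hcond : (j ≤ Bs.length ∧ i ≤ As.length ∧ (i ≤ k ∨ (i = k+1 ∧ j ≤ Bs.length))) ↔
        (j ≤ Bs.length ∧ i ≤ As.length ∧ i ≤ k+1) := by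
      constructor
      · rintro ⟨a, b, c⟩
        refine ⟨a, b, ?_⟩
        rcases c with c | c
        · omega
        · omega
      · rintro ⟨a, b, c⟩
        refine ⟨a, b, ?_⟩
        by_cases hik : i ≤ k
        · exact Or.inl hik
        · exact Or.inr ⟨by omega, a⟩
    by_cases h : j ≤ Bs.length ∧ i ≤ As.length ∧ i ≤ k+1
    · rw [if_pos (hcond.mpr h), if_pos h]
    · rw [if_neg (fun hx => h (hcond.mp hx)), if_neg h]

-- A's row function agrees with the pure top-down value
theorem rowF_eq_Dfun (As Bs : List Char) : ∀ i j, rowF As Bs i j = Dfun As Bs i j := by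
  intro i
  induction i with
  | zero =>
    intro j
    cases j with
    | zero => simp [rowF, Dfun]
    | succ j => simp [rowF, Dfun]
  | succ i ih =>
    intro j
    induction j with
    | zero =>
      show nextRowF Bs (As.getD i ' ') (rowF As Bs i) 0 = _
      rw [nextRowF, Dfun]
    | succ j ihj =>
      show nextRowF Bs (As.getD i ' ') (rowF As Bs i) (j+1) = _
      rw [nextRowF, Dfun]
      have h1 : nextRowF Bs (As.getD i ' ') (rowF As Bs i) j = Dfun As Bs (i+1) j := ihj
      rw [h1, ih j, ih (j+1)]
      split_ifs <;> omega

-- ===== B side: the memoized recursion computes Dfun and keeps the memo correct =====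
theorem dMemo_spec (As Bs : List Char) : ∀ N i j (memo : PySem.Dict (Nat × Nat) Int),
    i + j ≤ N →
    (∀ p v, memo.get? p = some v → v = Dfun As Bs p.1 p.2) →
    (dMemo As Bs i j memo).1 = Dfun As Bs i j ∧
    (∀ p v, (dMemo As Bs i j memo).2.get? p = some v → v = Dfun As Bs p.1 p.2) := by
  intro N
  induction N with
  | zero =>
    intro i j memo hN hm
    have hi : i = 0 := by omega
    have hj : j = 0 := by omega
    subst hi hj
    rw [dMemo, Dfun]
    exact ⟨rfl, hm⟩
  | succ N ihN =>
    intro i j memo hN hm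
    cases j with
    | zero =>
      rw [dMemo, Dfun]
      exact ⟨rfl, hm⟩
    | succ j =>
      cases i with
      | zero =>
        rw [dMemo, Dfun]
        exact ⟨rfl, hm⟩
      | succ i =>
        rw [dMemo, Dfun]
        cases hget : memo.get? (i+1, j+1) with
        | some v =>
          simp only []
          have hv := hm (i+1, j+1) v hget
          rw [Dfun] at hv
          exact ⟨hv, hm⟩
        | none =>
          simp only []
          split_ifs with hc
          · obtain ⟨h1, h2⟩ := ihN i j memo (by omega) hm
            refine ⟨h1, fun p v hp => ?_⟩
            rw [PySem.Dict.get?_insert] at hp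
            split_ifs at hp with hpe
            · cases hp
              subst hpe
              rw [Dfun, if_pos hc]
              exact h1
            · exact h2 p v hp
          · obtain ⟨h1, h2⟩ := ihN (i+1) j memo (by omega) hm
            obtain ⟨h3, h4⟩ := ihN i (j+1) _ (by omega) h2
            obtain ⟨h5, h6⟩ := ihN i j _ (by omega) h4
            refine ⟨by rw [h1, h3, h5], fun p v hp => ?_⟩
            rw [PySem.Dict.get?_insert] at hp
            split_ifs at hp with hpe
            · cases hp
              subst hpe
              rw [Dfun, if_neg hc, h1, h3, h5]
            · exact h6 p v hp

-- ===== VERDICT (by name: the statement is the Claim_ definition above) =====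
theorem edistance_substring_spec : Claim_equal_edistance_substring := by
  intro A B _
  show edistance_substring A B = edistance_substring_alt A B
  obtain ⟨_, hv⟩ := outer_spec A.toList B.toList A.toList.length (le_refl _)
  have hA : edistance_substring A B = getTbl (tblA A.toList B.toList A.toList.length) B.toList.length A.toList.length := rfl
  have hB : edistance_substring_alt A B = Dfun A.toList B.toList A.toList.length B.toList.length := by
    have h := dMemo_spec A.toList B.toList (A.toList.length + B.toList.length)
      A.toList.length B.toList.length PySem.Dict.empty (le_refl _)
      (fun p v hp => by simp [PySem.Dict.get?_empty] at hp)
    exact h.1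
  rw [hA, hB, hv, if_pos ⟨le_refl _, le_refl _, le_refl _⟩, rowF_eq_Dfun]
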